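-- pv_equiv track=rewrite | github.com/tpqls774/eati-AI | main.py | map_keywords_by_rules
-- ===== SOURCE A (Python) =====
-- def map_keywords_by_rules(food_name, keyword_rules):
--     # 결과 키워드 저장 리스트
--     matched_keywords = []
--     # 각 키워드 규칙 확인
--     for keyword, triggers in keyword_rules.items():
--         for trigger in triggers:
--             if trigger in food_name:  # 음식명에 트리거 단어가 포함되면
--                 matched_keywords.append(keyword)
--                 break
--     return matched_keywords
-- ===== SOURCE B (Python) =====
-- def map_keywords_by_rules(food_name, keyword_rules):
--     # B: precompute the set of ALL substrings of food_name once, then each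
--     # trigger check is a single set lookup instead of a substring scan.
--     n = len(food_name)
--     subs = {food_name[i:j] for i in range(n + 1) for j in range(i, n + 1)}
--     return [kw for kw, triggers in keyword_rules.items() if any(t in subs for t in triggers)]
-- ===== Notes on version B (the rewrite author's own statement) =====
-- stated objective: alternative
-- what changed: B precomputes the set of all substrings of food_name once and replaces A's per-trigger substring scan with a set lookup, emitting keywords via a comprehension with any() instead of a loop with break.
import Mathlib
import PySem

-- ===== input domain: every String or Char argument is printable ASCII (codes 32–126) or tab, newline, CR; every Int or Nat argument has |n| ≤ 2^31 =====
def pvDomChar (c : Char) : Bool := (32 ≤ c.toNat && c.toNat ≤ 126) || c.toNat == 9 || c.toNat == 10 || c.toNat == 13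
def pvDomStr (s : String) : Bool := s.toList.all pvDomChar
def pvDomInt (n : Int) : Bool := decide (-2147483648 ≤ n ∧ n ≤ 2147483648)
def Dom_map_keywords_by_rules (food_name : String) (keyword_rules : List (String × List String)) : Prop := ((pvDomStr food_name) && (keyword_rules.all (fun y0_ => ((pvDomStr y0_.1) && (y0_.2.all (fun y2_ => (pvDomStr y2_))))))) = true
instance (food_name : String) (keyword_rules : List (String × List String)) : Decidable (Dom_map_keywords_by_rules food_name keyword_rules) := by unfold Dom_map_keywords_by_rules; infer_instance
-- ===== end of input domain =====

-- B precomputes the set of all substrings of food_name once, so each trigger check is a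
-- set lookup instead of a substring scan (objective: alternative algorithm, same results).

-- ===== PORT A =====
-- inner 'for trigger in triggers: if trigger in food_name: append; break'
def pvInnerA (food_name keyword : String) : List String → List String → List String
  | acc, [] => acc
  | acc, t :: ts =>
      if PySem.Str.isIn t food_name then acc ++ [keyword]
      else pvInnerA food_name keyword acc ts

def map_keywords_by_rules (food_name : String) (keyword_rules : List (String × List String)) : List String :=
  keyword_rules.foldl (fun acc p => pvInnerA food_name p.1 acc p.2) []

-- ===== PORT B =====
-- subs = {food_name[i:j] for i in range(n+1) for j in range(i, n+1)}
def pvSubs (food_name : String) : PySem.Set String :=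
  PySem.Set.ofList
    ((PySem.List.pyRange 0 (PySem.Str.len food_name + 1) 1).flatMap fun i =>
      (PySem.List.pyRange i (PySem.Str.len food_name + 1) 1).map fun j =>
        PySem.Str.slice food_name (some i) (some j))

def map_keywords_by_rules_alt (food_name : String) (keyword_rules : List (String × List String)) : List String :=
  let subs := pvSubs food_name
  (keyword_rules.filter fun p => p.2.any fun t => subs.contains t).map Prod.fst

-- ===== PRECONDITION & SPEC =====
def Spec_map_keywords_by_rules (food_name : String) (keyword_rules : List (String × List String)) (out : List String) : Prop := out = map_keywords_by_rules_alt food_name keyword_rules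
instance (food_name : String) (keyword_rules : List (String × List String)) (out : List String) : Decidable (Spec_map_keywords_by_rules food_name keyword_rules out) := by unfold Spec_map_keywords_by_rules; infer_instance

-- ===== CLAIM (what is proved, stated in full; the proofs are below) =====
def Claim_equal_map_keywords_by_rules : Prop := ∀ (food_name : String) (keyword_rules : List (String × List String)), Dom_map_keywords_by_rules food_name keyword_rules → Spec_map_keywords_by_rules food_name keyword_rules (map_keywords_by_rules food_name keyword_rules)

-- ===== LEMMAS AND PROOFS =====

-- membership in the precomputed substring set is exactly Python's 'trigger in food_name'
theorem pv_contains_subs (fn t : String) :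
    (pvSubs fn).contains t = PySem.Str.isIn t fn := by
  rw [Bool.eq_iff_iff, PySem.Set.contains_iff, pvSubs, PySem.Set.mem_ofList,
    PySem.Str.isIn_eq, PySem.Chars.isIn_iff_infix]
  simp only [List.mem_flatMap, List.mem_map, PySem.List.mem_pyRange_one]
  have hlen : PySem.Str.len fn = (fn.toList.length : Int) := by
    simp [PySem.Str.len_eq]
  constructor
  · rintro ⟨i, ⟨hi0, _⟩, j, ⟨hij, _⟩, hslice⟩
    have hj0 : 0 ≤ j := le_trans hi0 hij
    have ht : t.toList = List.take (j.toNat - i.toNat) (List.drop i.toNat fn.toList) := by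
      rw [← hslice, PySem.Str.toList_slice, PySem.Chars.slice_eq_listSlice,
        ← Int.toNat_of_nonneg hi0, ← Int.toNat_of_nonneg hj0,
        PySem.List.slice_natCast]
      simp [max_eq_left hi0, max_eq_left hj0]
    rw [ht]
    exact ((List.take_prefix _ _).isInfix).trans (List.drop_suffix _ _).isInfix
  · rintro ⟨pre, post, h⟩
    have hsplit : pre.length + t.toList.length + post.length = fn.toList.length := by
      rw [← h]; simp [Nat.add_assoc]
    refine ⟨(pre.length : Int), ⟨Int.natCast_nonneg _, ?_⟩,
      (pre.length : Int) + (t.toList.length : Int),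
      ⟨le_add_of_nonneg_right (Int.natCast_nonneg _), ?_⟩, ?_⟩
    · rw [hlen]; push_cast; omega
    · rw [hlen]; push_cast; omega
    · apply String.toList_inj.mp
      rw [PySem.Str.toList_slice, PySem.Chars.slice_eq_listSlice,
        PySem.List.slice_natCast_add, ← h, List.append_assoc, List.drop_left,
        List.take_left]

-- A's inner break-loop appends the keyword exactly when some trigger matches
theorem pv_innerA_eq (fn kw : String) (ts acc : List String) :
    pvInnerA fn kw acc ts =
      acc ++ (if ts.any (fun t => PySem.Str.isIn t fn) then [kw] else []) := by
  induction ts generalizing acc with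
  | nil => simp [pvInnerA]
  | cons t ts ih =>
      cases hc : PySem.Str.isIn t fn with
      | true => simp [pvInnerA, List.any_cons, hc, -PySem.Str.isIn_eq]
      | false => simp [pvInnerA, List.any_cons, hc, ih, -PySem.Str.isIn_eq]

-- A's outer fold is the filter-map B performs
theorem pv_fold_eq (fn : String) (rules : List (String × List String)) (acc : List String) :
    rules.foldl (fun acc p => pvInnerA fn p.1 acc p.2) acc =
      acc ++ (rules.filter fun p => p.2.any fun t => PySem.Str.isIn t fn).map Prod.fst := by
  induction rules generalizing acc with
  | nil => simp
  | cons p ps ih =>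
      rw [List.foldl_cons, ih, pv_innerA_eq]
      cases h : p.2.any (fun t => PySem.Str.isIn t fn) with
      | true => simp [h, -PySem.Str.isIn_eq]
      | false => simp [h, -PySem.Str.isIn_eq]

-- ===== VERDICT (by name: the statement is the Claim_ definition above) =====
theorem map_keywords_by_rules_spec : Claim_equal_map_keywords_by_rules := by
  intro fn rules _
  unfold Spec_map_keywords_by_rules map_keywords_by_rules map_keywords_by_rules_alt
  rw [pv_fold_eq, List.nil_append]
  congr 1
  apply List.filter_congr
  intro p _
  congr 1
  funext t
  rw [pv_contains_subs]
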